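-- pv_equiv track=rewrite | github.com/jzisheng/interview-questions | lc/dfs/peopleHazards/peopleHazards.py | peopleHazard
-- ===== SOURCE A (Python) =====
-- from collections import defaultdict
--
-- def peopleHazard(n,a,p):
--     graph = defaultdict(list)
--     for idx in range(len(a)):
--         personA,personB = a[idx],p[idx]
--         graph[personA].append(personB)
--     result = []
--     # [1,2,3]
--     people = list(range(1,n+1))
--     def dfs(prev,idx,cur=[]):
--         if idx >= n:
--             if (cur) and cur not in result:
--                 result.append(cur)
--             return
--         a = people[idx]
--         if a not in graph[prev]:
--             dfs(a,idx+1,cur+[a])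
--         dfs(a,idx+1,cur)
--     for i in range(n):
--         node = people[i]
--         dfs(None,i)
--     return result
--     pass
-- ===== SOURCE B (Python) =====
-- def peopleHazard(n, a, p):
--     # iterative DFS with an explicit stack of (prev, idx, cur) frames
--     adj = {}
--     for x, y in zip(a, p):
--         adj.setdefault(x, set()).add(y)
--     result = []
--     for i in range(n):
--         stack = [(None, i, [])]
--         while stack:
--             prev, idx, cur = stack.pop()
--             if idx >= n:
--                 if cur and cur not in result:
--                     result.append(cur)
--                 continue
--             person = idx + 1
--             # push exclude first so the include child is popped (and appended) first
--             stack.append((person, idx + 1, cur))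
--             if person not in adj.get(prev, ()):
--                 stack.append((person, idx + 1, cur + [person]))
--     return result
-- ===== Notes on version B (the rewrite author's own statement) =====
-- stated objective: alternative
-- what changed: The recursive include/exclude DFS closure is replaced by an iterative search driven by an explicit stack of (prev, idx, cur) frames (include child pushed last so it is popped first), and the defaultdict-of-lists graph is replaced by a dict of sets built from zip(a, p) with an index-free per-frame person computation.
import Mathlib
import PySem

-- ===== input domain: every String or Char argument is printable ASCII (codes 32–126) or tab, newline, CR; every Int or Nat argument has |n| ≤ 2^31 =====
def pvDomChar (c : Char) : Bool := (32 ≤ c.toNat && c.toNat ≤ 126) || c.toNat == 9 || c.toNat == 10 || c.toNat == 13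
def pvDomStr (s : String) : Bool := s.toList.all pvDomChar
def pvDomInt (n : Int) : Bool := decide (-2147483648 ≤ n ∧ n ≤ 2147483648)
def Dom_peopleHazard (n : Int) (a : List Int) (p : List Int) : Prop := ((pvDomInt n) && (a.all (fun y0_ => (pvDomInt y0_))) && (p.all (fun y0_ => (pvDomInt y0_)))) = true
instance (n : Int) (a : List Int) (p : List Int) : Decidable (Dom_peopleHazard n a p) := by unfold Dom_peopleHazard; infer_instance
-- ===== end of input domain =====

-- B replaces A's recursive include/exclude DFS closure with an explicit stack of
-- (prev, idx, cur) frames and builds the hazard map as a dict of sets from zip(a, p)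
-- (objective: alternative decomposition, same cost).


-- ===== PORT A =====
-- graph = defaultdict(list); for idx in range(len(a)): graph[a[idx]].append(p[idx])
-- (a[idx]/p[idx] raise IndexError iff len(p) < len(a); those inputs are excluded by Pre_,
--  so pyGetD's default value is never the value used there)
def pvGraphA (a p : List Int) : PySem.Dict (Option Int) (List Int) :=
  (PySem.List.pyRange 0 (PySem.List.len a) 1).foldl
    (fun g idx =>
      let personA := PySem.List.pyGetD a idx 0
      let personB := PySem.List.pyGetD p idx 0
      g.modify (some personA) [] (· ++ [personB]))
    PySem.Dict.empty

-- the inner closure dfs(prev, idx, cur), with the mutable result threaded through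
def pvDfsA (graph : PySem.Dict (Option Int) (List Int)) (people : List Int) (n : Int)
    (prev : Option Int) (idx : Int) (cur : List Int) (result : List (List Int)) :
    List (List Int) :=
  if n ≤ idx then
    if cur ≠ [] ∧ cur ∉ result then result ++ [cur] else result
  else
    match PySem.List.pyGet? people idx with
    | none => result   -- unreachable on the dfs's call sites: 0 ≤ idx < n = len(people)
    | some a0 =>
      -- if a not in graph[prev]: dfs(a, idx+1, cur+[a])
      let r1 := if a0 ∈ graph.getD prev [] then result
                else pvDfsA graph people n (some a0) (idx + 1) (cur ++ [a0]) result
      -- dfs(a, idx+1, cur)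
      pvDfsA graph people n (some a0) (idx + 1) cur r1
termination_by (n - idx).toNat
decreasing_by all_goals omega

def peopleHazard (n : Int) (a : List Int) (p : List Int) : List (List Int) :=
  let graph := pvGraphA a p
  let people := PySem.List.pyRange 1 (n + 1) 1
  (PySem.List.pyRange 0 n 1).foldl (fun result i => pvDfsA graph people n none i [] result) []

-- ===== PORT B =====
-- adj = {}; for x, y in zip(a, p): adj.setdefault(x, set()).add(y)
def pvAdjB (a p : List Int) : PySem.Dict Int (PySem.Set Int) :=
  (a.zip p).foldl
    (fun d q => d.insert q.1 (PySem.Set.add (d.getD q.1 []) q.2))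
    PySem.Dict.empty

-- adj.get(prev, ()): adj's keys are ints, so the key None is always absent
def pvAdjGet (adj : PySem.Dict Int (PySem.Set Int)) (prev : Option Int) : PySem.Set Int :=
  match prev with
  | none => []
  | some k => adj.getD k []

-- termination measure for the stack loop: each popped frame of weight 3^(n-idx)
-- is replaced by at most two frames of weight 3^(n-idx-1)
def pvStackW (n : Int) (st : List (Option Int × Int × List Int)) : Nat :=
  (st.map (fun f => 3 ^ (n - f.2.1).toNat)).sum

theorem pvStackW_pop (n : Int) (prev : Option Int) (idx : Int) (cur : List Int)
    (rest : List (Option Int × Int × List Int)) :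
    pvStackW n rest < pvStackW n ((prev, idx, cur) :: rest) := by
  have h3 : 0 < 3 ^ (n - idx).toNat := pow_pos (by norm_num : (0:ℕ) < 3) _
  simp only [pvStackW, List.map_cons, List.sum_cons]
  omega

theorem pvStackW_push (n : Int) (prev prev' : Option Int) (idx : Int)
    (cur cur' cur'' : List Int) (rest : List (Option Int × Int × List Int))
    (h : ¬ n ≤ idx) :
    pvStackW n ((prev', idx + 1, cur') :: (prev', idx + 1, cur'') :: rest)
      < pvStackW n ((prev, idx, cur) :: rest) := by
  have hk : (n - idx).toNat = (n - (idx + 1)).toNat + 1 := by omega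
  have h3 : 0 < 3 ^ (n - (idx + 1)).toNat := pow_pos (by norm_num : (0:ℕ) < 3) _
  simp only [pvStackW, List.map_cons, List.sum_cons, hk, pow_succ]
  omega

theorem pvStackW_push_one (n : Int) (prev prev' : Option Int) (idx : Int)
    (cur cur' : List Int) (rest : List (Option Int × Int × List Int))
    (h : ¬ n ≤ idx) :
    pvStackW n ((prev', idx + 1, cur') :: rest) < pvStackW n ((prev, idx, cur) :: rest) := by
  have hk : (n - idx).toNat = (n - (idx + 1)).toNat + 1 := by omega
  have h3 : 0 < 3 ^ (n - (idx + 1)).toNat := pow_pos (by norm_num : (0:ℕ) < 3) _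
  simp only [pvStackW, List.map_cons, List.sum_cons, hk, pow_succ]
  omega

-- the 'while stack:' loop
def pvRunB (adj : PySem.Dict Int (PySem.Set Int)) (n : Int)
    (stack : List (Option Int × Int × List Int)) (result : List (List Int)) :
    List (List Int) :=
  match stack with
  | [] => result
  | (prev, idx, cur) :: rest =>
    if h : n ≤ idx then
      pvRunB adj n rest (if cur ≠ [] ∧ cur ∉ result then result ++ [cur] else result)
    else
      let person := idx + 1
      -- exclude child pushed first, include child (if allowed) on top
      if person ∈ pvAdjGet adj prev then
        pvRunB adj n ((some person, idx + 1, cur) :: rest) result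
      else
        pvRunB adj n
          ((some person, idx + 1, cur ++ [person]) :: (some person, idx + 1, cur) :: rest)
          result
termination_by pvStackW n stack
decreasing_by
  · exact pvStackW_pop n prev idx cur rest
  · exact pvStackW_push_one n prev (some (idx + 1)) idx cur cur rest h
  · exact pvStackW_push n prev (some (idx + 1)) idx cur (cur ++ [idx + 1]) cur rest h

def peopleHazard_alt (n : Int) (a : List Int) (p : List Int) : List (List Int) :=
  let adj := pvAdjB a p
  (PySem.List.pyRange 0 n 1).foldl
    (fun result i => pvRunB adj n [(none, i, [])] result) []

-- ===== PRECONDITION & SPEC =====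
-- Pre_ excludes exactly the inputs where A raises IndexError (p shorter than a, so p[idx] fails)
def Pre_peopleHazard (n : Int) (a : List Int) (p : List Int) : Prop := a.length ≤ p.length
instance (n : Int) (a : List Int) (p : List Int) : Decidable (Pre_peopleHazard n a p) := by
  unfold Pre_peopleHazard; infer_instance
def pvWitness_peopleHazard : Int × List Int × List Int := (2, [1], [2])

def Spec_peopleHazard (n : Int) (a : List Int) (p : List Int) (out : List (List Int)) : Prop :=
  out = peopleHazard_alt n a p
instance (n : Int) (a : List Int) (p : List Int) (out : List (List Int)) :
    Decidable (Spec_peopleHazard n a p out) := by unfold Spec_peopleHazard; infer_instance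

-- ===== CLAIM (what is proved, stated in full; the proofs are below) =====
def Claim_equal_peopleHazard : Prop := ∀ (n : Int) (a : List Int) (p : List Int),
  Dom_peopleHazard n a p → Pre_peopleHazard n a p →
    Spec_peopleHazard n a p (peopleHazard n a p)

-- ===== LEMMAS AND PROOFS =====

-- A's dfs, written as a recursive function (proof-side mirror of the stack loop)
def pvDfsB (adj : PySem.Dict Int (PySem.Set Int)) (n : Int)
    (prev : Option Int) (idx : Int) (cur : List Int) (result : List (List Int)) :
    List (List Int) :=
  if h : n ≤ idx then
    if cur ≠ [] ∧ cur ∉ result then result ++ [cur] else result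
  else
    let a0 := idx + 1
    let r1 := if a0 ∈ pvAdjGet adj prev then result
              else pvDfsB adj n (some a0) (idx + 1) (cur ++ [a0]) result
    pvDfsB adj n (some a0) (idx + 1) cur r1
termination_by (n - idx).toNat
decreasing_by all_goals omega

-- processing the top frame completely equals one dfs call
theorem pvRunB_cons (adj : PySem.Dict Int (PySem.Set Int)) (n : Int) :
    ∀ (k : Nat) (prev : Option Int) (idx : Int) (cur : List Int)
      (rest : List (Option Int × Int × List Int)) (result : List (List Int)),
      (n - idx).toNat = k →
      pvRunB adj n ((prev, idx, cur) :: rest) result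
        = pvRunB adj n rest (pvDfsB adj n prev idx cur result) := by
  intro k
  induction k with
  | zero =>
    intro prev idx cur rest result hk
    have h : n ≤ idx := by omega
    rw [pvRunB, pvDfsB]
    simp [h]
  | succ k ih =>
    intro prev idx cur rest result hk
    have h : ¬ n ≤ idx := by omega
    have hk' : (n - (idx + 1)).toNat = k := by omega
    rw [pvRunB, pvDfsB]
    simp only [h, dite_false]
    by_cases hm : (idx + 1) ∈ pvAdjGet adj prev
    · simp only [hm, ite_true]
      exact ih (some (idx + 1)) (idx + 1) cur rest result hk'
    · simp only [hm, ite_false]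
      rw [ih (some (idx + 1)) (idx + 1) (cur ++ [idx + 1]) _ result hk',
          ih (some (idx + 1)) (idx + 1) cur rest _ hk']

theorem pvRunB_seed (adj : PySem.Dict Int (PySem.Set Int)) (n i : Int)
    (result : List (List Int)) :
    pvRunB adj n [(none, i, [])] result = pvDfsB adj n none i [] result := by
  rw [pvRunB_cons adj n (n - i).toNat none i [] [] result rfl, pvRunB]

-- people = list(range(1, n+1)): people[idx] = idx + 1 for 0 ≤ idx < n
theorem pvPeople_get (n idx : Int) (h0 : 0 ≤ idx) (h1 : idx < n) :
    PySem.List.pyGet? (PySem.List.pyRange 1 (n + 1) 1) idx = some (idx + 1) := by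
  rw [PySem.List.pyGet?_of_nonneg _ h0, PySem.List.pyRange_one]
  rw [List.getElem?_map]
  have hlt : idx.toNat < (n + 1 - 1).toNat := by omega
  rw [List.getElem?_range hlt]
  simp
  omega

-- A's dfs equals B's dfs whenever the two hazard lookups agree as sets
theorem pvDfsA_eq_pvDfsB (graph : PySem.Dict (Option Int) (List Int))
    (adj : PySem.Dict Int (PySem.Set Int)) (n : Int)
    (hmem : ∀ (prev : Option Int) (y : Int), y ∈ graph.getD prev [] ↔ y ∈ pvAdjGet adj prev) :
    ∀ (k : Nat) (prev : Option Int) (idx : Int) (cur : List Int) (result : List (List Int)),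
      (n - idx).toNat = k → 0 ≤ idx →
      pvDfsA graph (PySem.List.pyRange 1 (n + 1) 1) n prev idx cur result
        = pvDfsB adj n prev idx cur result := by
  intro k
  induction k with
  | zero =>
    intro prev idx cur result hk h0
    have h : n ≤ idx := by omega
    rw [pvDfsA, pvDfsB]
    simp [h]
  | succ k ih =>
    intro prev idx cur result hk h0
    have h : ¬ n ≤ idx := by omega
    have hk' : (n - (idx + 1)).toNat = k := by omega
    rw [pvDfsA, pvDfsB]
    simp only [if_neg h, dif_neg h, pvPeople_get n idx h0 (by omega)]
    have hiff := hmem prev (idx + 1)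
    by_cases hm : (idx + 1) ∈ pvAdjGet adj prev
    · simp only [hiff.mpr hm, if_pos, hm]
      exact ih (some (idx + 1)) (idx + 1) cur result hk' (by omega)
    · have hA : ¬ (idx + 1) ∈ graph.getD prev [] := fun hx => hm (hiff.mp hx)
      simp only [if_neg hA, if_neg hm]
      rw [ih (some (idx + 1)) (idx + 1) (cur ++ [idx + 1]) result hk' (by omega),
          ih (some (idx + 1)) (idx + 1) cur _ hk' (by omega)]

-- the index-loop graph build is the zip-loop graph build (when p is long enough)
theorem pvGraphA_eq_zip_fold :
    ∀ (a p : List Int) (d : PySem.Dict (Option Int) (List Int)), a.length ≤ p.length →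
      (List.range a.length).foldl
          (fun g k => g.modify (some (a.getD k 0)) [] (· ++ [p.getD k 0])) d
        = (a.zip p).foldl (fun g q => g.modify (some q.1) [] (· ++ [q.2])) d := by
  intro a
  induction a with
  | nil => intro p d _; simp
  | cons x a' ih =>
    intro p d hlen
    match p with
    | [] => simp at hlen
    | y :: p' =>
      simp only [List.length_cons]
      rw [List.range_succ_eq_map]
      simp only [List.foldl_cons, List.foldl_map, List.getD_cons_zero, List.getD_cons_succ,
        List.zip_cons_cons]
      exact ih p' _ (by simpa using hlen)

theorem pvGraphA_getD (a p : List Int) (hlen : a.length ≤ p.length) (c : Option Int) :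
    (pvGraphA a p).getD c []
      = (((a.zip p).map (fun q => ((some q.1 : Option Int), q.2))).filter
          (fun q => q.1 == c)).map (·.2) := by
  unfold pvGraphA
  rw [PySem.List.pyRange_one]
  have hlen' : ((PySem.List.len a : Int) - 0).toNat = a.length := by
    simp [PySem.List.len_eq]
  rw [hlen', List.foldl_map]
  have hstep : ∀ (g : PySem.Dict (Option Int) (List Int)) (k : Nat), k ∈ List.range a.length →
      g.modify (some (PySem.List.pyGetD a ((0 : Int) + k) 0)) []
          (· ++ [PySem.List.pyGetD p ((0 : Int) + k) 0])
        = g.modify (some (a.getD k 0)) [] (· ++ [p.getD k 0]) := by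
    intro g k _
    simp [PySem.List.pyGetD_natCast]
  rw [PySem.List.foldl_congr_mem _ _ _ _ hstep, pvGraphA_eq_zip_fold a p _ hlen]
  have hmap : (a.zip p).foldl (fun g q => g.modify (some q.1) [] (· ++ [q.2])) PySem.Dict.empty
      = ((a.zip p).map (fun q => ((some q.1 : Option Int), q.2))).foldl
          (fun g q => g.modify q.1 [] (· ++ [q.2])) PySem.Dict.empty := by
    rw [List.foldl_map]
  rw [hmap, PySem.Dict.getD_foldl_modify_append]
  simp

-- membership in B's adjacency dict
theorem pvAdjB_mem :
    ∀ (l : List (Int × Int)) (g : PySem.Dict Int (PySem.Set Int)) (k y : Int),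
      y ∈ (l.foldl (fun d q => d.insert q.1 (PySem.Set.add (d.getD q.1 []) q.2)) g).getD k []
        ↔ y ∈ g.getD k [] ∨ (k, y) ∈ l := by
  intro l
  induction l with
  | nil => simp
  | cons q l' ih =>
    intro g k y
    obtain ⟨qx, qy⟩ := q
    rw [List.foldl_cons, ih, PySem.Dict.getD_insert]
    by_cases hk : k = qx
    · subst hk
      simp [PySem.Set.mem_add]
      tauto
    · simp only [if_neg hk, List.mem_cons, Prod.mk.injEq]
      constructor
      · tauto
      · rintro (h | ⟨h1, h2⟩ | h)
        · exact Or.inl h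
        · exact absurd h1 hk
        · exact Or.inr h

-- the two hazard lookups agree as sets
theorem pvLookup_agree (a p : List Int) (hlen : a.length ≤ p.length)
    (prev : Option Int) (y : Int) :
    y ∈ (pvGraphA a p).getD prev [] ↔ y ∈ pvAdjGet (pvAdjB a p) prev := by
  rw [pvGraphA_getD a p hlen prev]
  cases prev with
  | none =>
    simp [pvAdjGet, List.mem_filter]
  | some x =>
    unfold pvAdjGet pvAdjB
    rw [pvAdjB_mem (a.zip p) PySem.Dict.empty x y]
    simp only [PySem.Dict.getD_empty, List.not_mem_nil, false_or]
    simp only [List.mem_map, List.mem_filter]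
    constructor
    · rintro ⟨q, ⟨⟨q', hq', rfl⟩, hfil⟩, rfl⟩
      have : some q'.1 = some x := by simpa using hfil
      have hx : q'.1 = x := by injection this
      exact hx ▸ (by cases q'; simpa using hq')
    · intro hxy
      exact ⟨(some x, y), ⟨⟨(x, y), hxy, rfl⟩, by simp⟩, rfl⟩

-- ===== VERDICT (by name: the statement is the Claim_ definition above) =====
theorem peopleHazard_spec : Claim_equal_peopleHazard := by
  intro n a p _hdom hpre
  unfold Spec_peopleHazard peopleHazard peopleHazard_alt
  apply PySem.List.foldl_congr_mem
  intro result i hi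
  have h0 : 0 ≤ i := (PySem.List.mem_pyRange_one.mp hi).1
  rw [pvRunB_seed, pvDfsA_eq_pvDfsB (pvGraphA a p) (pvAdjB a p) n
      (pvLookup_agree a p hpre) (n - i).toNat none i [] result rfl h0]
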